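-- pv_equiv track=rewrite | github.com/Sudorenkoroma/Algorithms | LeetCode/In-Place_Op/Exapmle.py | square_even
-- ===== SOURCE A (Python) =====
-- def square_even(array, length):
--     # Check for edge cases.
--     if array is None:
--         return None
--
--     # Create a resultant array which would hold the result.
--     result = [0] * length
--
--     # Iterate through the original array.
--     for i in range(length):
--         # Get the element from index i of the input array.
--         element = array[i]
--
--         # If the index is an even number, then square the element.
--         if i % 2 == 0:
--             element *= element
--
--         # Write the element into the result array.
--         result[i] = element
--
--     # Return the result array.
--     return result
-- ===== SOURCE B (Python) =====
-- def square_even(array, length):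
--     # Same None guard as the task requires.
--     if array is None:
--         return None
--
--     # Copy pass: materialise the first `length` elements by index
--     # (raises IndexError for an out-of-range length, like direct indexing).
--     prefix = [array[i] for i in range(length)]
--
--     # Pair pass: consume the prefix two at a time — square the first of each
--     # pair, copy the second; a trailing single element is squared.
--     out = []
--     i = 0
--     n = len(prefix)
--     while i + 1 < n:
--         out.append(prefix[i] * prefix[i])
--         out.append(prefix[i + 1])
--         i += 2
--     if i < n:
--         out.append(prefix[i] * prefix[i])
--     return out
-- ===== Notes on version B (the rewrite author's own statement) =====
-- stated objective: alternative
-- what changed: A's single parity-testing loop that writes into a preallocated [0]*length buffer is replaced by two differently-shaped passes: an index copy of the first length elements, then a pair-wise pass that consumes the copy two elements at a time (square first of pair, copy second, square a trailing singleton) with no parity test and no preallocated buffer.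
import Mathlib
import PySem

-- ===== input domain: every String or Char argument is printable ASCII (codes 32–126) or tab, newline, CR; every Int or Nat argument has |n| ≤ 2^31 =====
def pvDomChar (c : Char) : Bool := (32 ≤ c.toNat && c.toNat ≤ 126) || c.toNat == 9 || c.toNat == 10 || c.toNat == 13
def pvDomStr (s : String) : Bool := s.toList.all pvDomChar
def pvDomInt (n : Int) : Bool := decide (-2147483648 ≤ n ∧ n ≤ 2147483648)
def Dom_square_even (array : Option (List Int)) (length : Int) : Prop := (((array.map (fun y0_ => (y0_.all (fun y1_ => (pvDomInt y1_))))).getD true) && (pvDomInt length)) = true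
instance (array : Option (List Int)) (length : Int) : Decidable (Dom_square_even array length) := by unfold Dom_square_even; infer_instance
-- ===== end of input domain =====

-- B replaces A's parity-testing write loop by a copy pass plus a pair-wise pass (alternative decomposition, same cost); return-value equivalence on Pre_.

-- ===== PORT A =====
-- Literal port of A: result = [0]*length; for i in range(length): element = array[i]
-- (ported as pyGetD, exact under Pre_'s in-range condition); square if i even; result[i] = element.
def square_even (array : Option (List Int)) (length : Int) : Option (List Int) :=
  match array with
  | none => none
  | some xs =>
    let result0 : List Int := List.replicate length.toNat 0
    some ((PySem.List.pyRange 0 length 1).foldl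
      (fun res i =>
        let element := PySem.List.pyGetD xs i 0
        let element := if i % 2 = 0 then element * element else element
        res.set i.toNat element) result0)

-- ===== PORT B =====
-- Pair pass of Source B: consume two at a time, square first, copy second; trailing singleton squared.
def pairSquare : List Int → List Int
  | [] => []
  | [a] => [a * a]
  | a :: b :: rest => a * a :: b :: pairSquare rest

def square_even_alt (array : Option (List Int)) (length : Int) : Option (List Int) :=
  match array with
  | none => none
  | some xs =>
    -- copy pass: prefix = [array[i] for i in range(length)] (pyGetD, exact under Pre_)
    let pref := (PySem.List.pyRange 0 length 1).map (fun i => PySem.List.pyGetD xs i 0)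
    some (pairSquare pref)

-- ===== PRECONDITION & SPEC =====
-- Pre_ excludes exactly the inputs where A (and B alike) raises IndexError: a non-None
-- array with length > len(array). Negative/zero lengths are fine (range is empty).
def Pre_square_even (array : Option (List Int)) (length : Int) : Prop :=
  (array.map (fun xs => decide (length ≤ (xs.length : Int)))).getD true = true
instance (array : Option (List Int)) (length : Int) : Decidable (Pre_square_even array length) := by unfold Pre_square_even; infer_instance

def pvWitness_square_even : Option (List Int) × Int := (some [1, 2, 3, 4, 5], 5)

def Spec_square_even (array : Option (List Int)) (length : Int) (out : Option (List Int)) : Prop := out = square_even_alt array length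
instance (array : Option (List Int)) (length : Int) (out : Option (List Int)) : Decidable (Spec_square_even array length out) := by unfold Spec_square_even; infer_instance

-- ===== CLAIM (what is proved, stated in full; the proofs are below) =====
def Claim_equal_square_even : Prop := ∀ (array : Option (List Int)) (length : Int), Dom_square_even array length → Pre_square_even array length → Spec_square_even array length (square_even array length)

-- ===== LEMMAS AND PROOFS =====

-- A's write loop into the replicate buffer produces a map over the range.
theorem fold_set_range (f : Nat → Int) :
    ∀ (n : Nat) (suffix : List Int),
      (List.range n).foldl (fun res i => res.set i (f i)) (List.replicate n (0:Int) ++ suffix)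
        = (List.range n).map f ++ suffix := by
  intro n
  induction n with
  | zero => intro suffix; simp
  | succ n ih =>
    intro suffix
    have hrep : List.replicate (n+1) (0:Int) ++ suffix
        = List.replicate n (0:Int) ++ (0 :: suffix) := by
      simp [List.replicate_succ']
    rw [List.range_succ, List.foldl_append, hrep, ih (0 :: suffix)]
    simp [List.map_append]

-- B's pair pass over a mapped range is the parity map.
theorem pairSquare_range :
    ∀ (n : Nat) (h : Nat → Int),
      pairSquare ((List.range n).map h)
        = (List.range n).map (fun i => if i % 2 = 0 then h i * h i else h i) := by
  intro n
  induction n using Nat.strong_induction_on with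
  | _ n ih =>
    intro h
    match n with
    | 0 => simp [pairSquare]
    | 1 => simp [pairSquare, List.range_succ]
    | Nat.succ (Nat.succ m) =>
      have h2 : List.range (m + 2) = 0 :: 1 :: (List.range m).map (fun i => i + 2) := by
        rw [List.range_succ_eq_map, List.range_succ_eq_map]
        simp [List.map_map, Function.comp_def]
      show pairSquare ((List.range (m + 2)).map h)
          = (List.range (m + 2)).map (fun i => if i % 2 = 0 then h i * h i else h i)
      rw [h2]
      simp only [List.map_cons, List.map_map, Function.comp_def, pairSquare]
      rw [ih m (by omega) (fun i => h (i + 2))]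
      norm_num

theorem cast_mod_two (k : Nat) : ((k : Int) % 2 = 0) ↔ (k % 2 = 0) := by omega

-- ===== VERDICT (by name: the statement is the Claim_ definition above) =====
theorem square_even_spec : Claim_equal_square_even := by
  intro array length _ hpre
  unfold Spec_square_even
  match array with
  | none => rfl
  | some xs =>
    simp only [square_even, square_even_alt]
    congr 1
    rw [PySem.List.pyRange_one 0 length]
    simp only [List.foldl_map, List.map_map, Function.comp_def, zero_add, Int.sub_zero]
    rw [pairSquare_range length.toNat (fun k => PySem.List.pyGetD xs (k : Int) 0)]
    have hfold := fold_set_range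
      (fun k => if (k : Int) % 2 = 0 then
          PySem.List.pyGetD xs (k : Int) 0 * PySem.List.pyGetD xs (k : Int) 0
        else PySem.List.pyGetD xs (k : Int) 0) length.toNat []
    simp only [List.append_nil] at hfold
    have hstep : (fun (res : List Int) (k : Nat) =>
        res.set ((k : Int)).toNat
          (if (k : Int) % 2 = 0 then
              PySem.List.pyGetD xs (k : Int) 0 * PySem.List.pyGetD xs (k : Int) 0
            else PySem.List.pyGetD xs (k : Int) 0))
        = (fun (res : List Int) (k : Nat) =>
        res.set k
          (if (k : Int) % 2 = 0 then
              PySem.List.pyGetD xs (k : Int) 0 * PySem.List.pyGetD xs (k : Int) 0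
            else PySem.List.pyGetD xs (k : Int) 0)) := by
      funext res k; simp
    rw [hstep, hfold]
    apply List.map_congr_left
    intro i _
    have hcast : ((i : Int) % 2 = 0) ↔ (i % 2 = 0) := cast_mod_two i
    by_cases hp : i % 2 = 0 <;> simp [hp, hcast]
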